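-- pv_equiv track=rewrite | github.com/planetlab/sfa | geni/util/util.py | check_authority
-- ===== SOURCE A (Python) =====
-- def geni_to_arr(name):
--     arrayName = []
--     try:
--         parts = name.split(".")
--         for i in range(len(parts)):
--             arrayName.append(parts[i])
--         return arrayName
--     except:
--         raise MalformedHrnException(name)
--
-- def check_authority(hrn, hrn_auth):
--     arr = geni_to_arr(hrn)
--     arr_auth = geni_to_arr(hrn_auth)
--     try:
--         for i in range(len(arr_auth)):
--             if arr[i] != arr_auth[i]:
--                 return False
--     except:
--         return False
--     return True
-- ===== SOURCE B (Python) =====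
-- def check_authority(hrn, hrn_auth):
--     return hrn == hrn_auth or hrn.startswith(hrn_auth + ".")
-- ===== Notes on version B (the rewrite author's own statement) =====
-- stated objective: simpler
-- what changed: B never splits the names into component lists at all: instead of building both arrays and comparing them element by element, it decides the prefix question directly on the raw strings as hrn == hrn_auth or hrn.startswith(hrn_auth + '.'), which is correct because the '.'-separated components of hrn_auth are a prefix of those of hrn exactly when hrn equals hrn_auth or extends it past a dot.
import Mathlib
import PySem

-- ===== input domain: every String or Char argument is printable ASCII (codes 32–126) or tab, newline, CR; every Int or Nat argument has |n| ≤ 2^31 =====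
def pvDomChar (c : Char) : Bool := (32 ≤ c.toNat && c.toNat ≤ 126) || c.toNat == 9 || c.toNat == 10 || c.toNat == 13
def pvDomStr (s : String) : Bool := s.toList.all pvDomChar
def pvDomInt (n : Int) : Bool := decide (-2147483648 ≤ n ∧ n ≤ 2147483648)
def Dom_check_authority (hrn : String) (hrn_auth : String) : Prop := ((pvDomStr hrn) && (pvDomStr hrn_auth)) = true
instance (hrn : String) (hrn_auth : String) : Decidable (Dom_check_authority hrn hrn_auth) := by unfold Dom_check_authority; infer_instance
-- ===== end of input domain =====

-- B drops the split-into-components machinery entirely: it decides the prefix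
-- question on the raw strings (equality, or hrn starts with hrn_auth + ".");
-- objective: simpler.

-- ===== PORT A =====
-- geni_to_arr: split on "." then copy element by element into a new list
-- (split? is some for the literal nonempty separator ".", so .getD [] is exact)
def geni_to_arr (name : String) : List String :=
  ((PySem.Str.split? name ".").getD []).foldl (fun acc p => acc ++ [p]) []

-- the 'for i in range(len(arr_auth))' loop; pyGet? arr i = none is the
-- IndexError caught by A's 'except: return False'
def check_authority_loop (arr arr_auth : List String) (i : Nat) : Bool :=
  if _h : i < arr_auth.length then
    match PySem.List.pyGet? arr (i : Int) with
    | none => false                                   -- IndexError → except → False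
    | some x => if x ≠ arr_auth[i] then false else check_authority_loop arr arr_auth (i + 1)
  else true
termination_by arr_auth.length - i

def check_authority (hrn : String) (hrn_auth : String) : Bool :=
  let arr := geni_to_arr hrn
  let arr_auth := geni_to_arr hrn_auth
  check_authority_loop arr arr_auth 0

-- ===== PORT B =====
-- 'hrn == hrn_auth or hrn.startswith(hrn_auth + ".")'; the Python '+ "."' is
-- ported as the List Char append (Lean's own String.append is kernel-opaque)
def check_authority_alt (hrn : String) (hrn_auth : String) : Bool :=
  hrn == hrn_auth || PySem.Chars.startswith hrn.toList (hrn_auth.toList ++ ['.'])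

-- ===== PRECONDITION & SPEC =====
def Spec_check_authority (hrn : String) (hrn_auth : String) (out : Bool) : Prop := out = check_authority_alt hrn hrn_auth
instance (hrn : String) (hrn_auth : String) (out : Bool) : Decidable (Spec_check_authority hrn hrn_auth out) := by unfold Spec_check_authority; infer_instance

-- ===== CLAIM (what is proved, stated in full; the proofs are below) =====
def Claim_equal_check_authority : Prop := ∀ (hrn : String) (hrn_auth : String), Dom_check_authority hrn hrn_auth → Spec_check_authority hrn hrn_auth (check_authority hrn hrn_auth)

-- ===== LEMMAS AND PROOFS =====

-- A's loop is the take-prefix comparison of the two component lists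
theorem check_authority_loop_eq (arr arr_auth : List String) (i : Nat) :
    check_authority_loop arr arr_auth i
      = ((List.drop i arr).take (arr_auth.length - i) == List.drop i arr_auth) := by
  by_cases h : i < arr_auth.length
  · rw [check_authority_loop, dif_pos h, PySem.List.pyGet?_natCast]
    have hauth : List.drop i arr_auth = arr_auth[i] :: List.drop (i+1) arr_auth :=
      List.drop_eq_getElem_cons h
    rcases ha : arr[i]? with _ | x
    · have hlen : arr.length ≤ i := by simpa [List.getElem?_eq_none_iff] using ha
      rw [List.drop_eq_nil_of_le hlen, hauth]
      simp [h]
    · have hi : i < arr.length := (List.getElem?_eq_some_iff.mp ha).1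
      have hx : arr[i] = x := (List.getElem?_eq_some_iff.mp ha).2
      have hdropa : List.drop i arr = arr[i] :: List.drop (i+1) arr :=
        List.drop_eq_getElem_cons hi
      have hsub : arr_auth.length - i = (arr_auth.length - (i+1)) + 1 := by omega
      have ih := check_authority_loop_eq arr arr_auth (i+1)
      rw [hdropa, hauth, hsub, List.take_succ_cons, hx]
      show (if x ≠ arr_auth[i] then false else check_authority_loop arr arr_auth (i + 1))
          = (x :: List.take (arr_auth.length - (i + 1)) (List.drop (i + 1) arr)
              == arr_auth[i] :: List.drop (i + 1) arr_auth)
      by_cases hne : x = arr_auth[i]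
      · rw [if_neg (by simp [hne]), ih, List.cons_beq_cons]
        simp [hne]
      · rw [if_pos hne, List.cons_beq_cons]
        simp [hne]
  · rw [check_authority_loop, dif_neg h]
    have h1 : List.drop i arr_auth = [] := List.drop_eq_nil_of_le (by omega)
    have h2 : arr_auth.length - i = 0 := by omega
    simp [h1, h2]
termination_by arr_auth.length - i

-- reference single-char split on '.' (proof-side model of PySem.Chars.splitOn)
def pvSplit : List Char → List (List Char)
  | [] => [[]]
  | c :: rest => if c = '.' then [] :: pvSplit rest else (pvSplit rest).modifyHead (c :: ·)

-- its inverse: '.'-join of the parts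
def pvJoin : List (List Char) → List Char
  | [] => []
  | [p] => p
  | p :: q :: t => p ++ '.' :: pvJoin (q :: t)

theorem pvSplit_ne_nil (l : List Char) : pvSplit l ≠ [] := by
  cases l with
  | nil => simp [pvSplit]
  | cons c rest =>
    simp only [pvSplit]
    split
    · simp
    · exact fun h => pvSplit_ne_nil rest (List.modifyHead_eq_nil_iff.mp h)

theorem go_eq (fuel : Nat) (l cur : List Char) (acc : List (List Char))
    (h : l.length < fuel) :
    PySem.Chars.splitOn.go ['.'] fuel l cur acc
      = acc.reverse ++ (pvSplit l).modifyHead (cur.reverse ++ ·) := by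
  induction fuel generalizing l cur acc with
  | zero => omega
  | succ fuel ih =>
    cases l with
    | nil => simp [PySem.Chars.splitOn.go, pvSplit]
    | cons c rest =>
      rw [PySem.Chars.splitOn.go]
      by_cases hc : c = '.'
      · subst hc
        rw [if_pos (by simp [List.isPrefixOf])]
        simp only [List.length_cons] at h
        rw [show List.drop ['.'].length ('.' :: rest) = rest from rfl, ih _ _ _ (by omega)]
        rw [show pvSplit ('.' :: rest) = [] :: pvSplit rest from by simp [pvSplit]]
        cases hs : pvSplit rest with
        | nil => exact absurd hs (pvSplit_ne_nil rest)
        | cons p t => simp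
      · rw [if_neg (by simp [List.isPrefixOf]; exact fun h' => hc h'.symm)]
        simp only [List.length_cons] at h
        rw [ih _ _ _ (by omega)]
        cases hs : pvSplit rest with
        | nil => exact absurd hs (pvSplit_ne_nil rest)
        | cons p t => simp [pvSplit, hc, hs]

theorem splitOn_eq (l : List Char) : PySem.Chars.splitOn l ['.'] = pvSplit l := by
  rw [PySem.Chars.splitOn, go_eq _ _ _ _ (by omega)]
  cases hs : pvSplit l with
  | nil => exact absurd hs (pvSplit_ne_nil l)
  | cons p t => simp

theorem geni_to_arr_eq (name : String) :
    geni_to_arr name = (pvSplit name.toList).map String.ofList := by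
  unfold geni_to_arr
  rw [PySem.Str.split?, show (".":String).toList = ['.'] from rfl, PySem.Chars.split?]
  simp only [List.isEmpty_cons, Bool.false_eq_true, if_false, Option.map_some, Option.getD_some,
    splitOn_eq, PySem.List.foldl_append_singleton, List.nil_append]

theorem pvJoin_cons (p : List Char) (t : List (List Char)) (ht : t ≠ []) :
    pvJoin (p :: t) = p ++ '.' :: pvJoin t := by
  cases t with
  | nil => exact absurd rfl ht
  | cons q u => rfl

theorem pvJoin_pvSplit (l : List Char) : pvJoin (pvSplit l) = l := by
  induction l with
  | nil => rfl
  | cons c rest ih =>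
    by_cases hc : c = '.'
    · subst hc
      rw [show pvSplit ('.' :: rest) = [] :: pvSplit rest from by simp [pvSplit]]
      rw [pvJoin_cons _ _ (pvSplit_ne_nil rest), ih]
      rfl
    · rw [show pvSplit (c :: rest) = (pvSplit rest).modifyHead (c :: ·) from by simp [pvSplit, hc]]
      cases hs : pvSplit rest with
      | nil => exact absurd hs (pvSplit_ne_nil rest)
      | cons p t =>
        rw [hs] at ih
        cases t with
        | nil => simpa [pvJoin] using by rw [← ih]; simp [pvJoin]
        | cons q u =>
          simp only [List.modifyHead_cons, pvJoin]
          rw [← ih]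
          simp [pvJoin]

theorem pvSplit_append (ys zs : List Char) :
    pvSplit (ys ++ '.' :: zs) = pvSplit ys ++ pvSplit zs := by
  induction ys with
  | nil => simp [pvSplit]
  | cons c ys ih =>
    by_cases hc : c = '.'
    · subst hc; simp [pvSplit, ih]
    · simp only [List.cons_append, pvSplit, hc, if_false, ih]
      cases hs : pvSplit ys with
      | nil => exact absurd hs (pvSplit_ne_nil ys)
      | cons p t => simp

theorem pvJoin_append (as bs : List (List Char)) (ha : as ≠ []) (hb : bs ≠ []) :
    pvJoin (as ++ bs) = pvJoin as ++ '.' :: pvJoin bs := by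
  induction as with
  | nil => exact absurd rfl ha
  | cons p t ih =>
    cases t with
    | nil => simpa using pvJoin_cons p bs hb
    | cons q u =>
      rw [List.cons_append, pvJoin_cons _ _ (by simp), pvJoin_cons _ _ (by simp), ih (by simp)]
      simp

theorem pvSplit_inj {xs ys : List Char} (h : pvSplit xs = pvSplit ys) : xs = ys := by
  rw [← pvJoin_pvSplit xs, ← pvJoin_pvSplit ys, h]

-- the heart of the equivalence: the parts of ys are a prefix of the parts of
-- xs iff xs = ys or xs starts with ys followed by a dot
theorem take_pvSplit_iff (xs ys : List Char) :
    List.take (pvSplit ys).length (pvSplit xs) = pvSplit ys ↔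
      (xs = ys ∨ (ys ++ ['.']) <+: xs) := by
  constructor
  · intro h
    have hsplit : pvSplit xs = pvSplit ys ++ List.drop (pvSplit ys).length (pvSplit xs) := by
      conv_lhs => rw [← List.take_append_drop (pvSplit ys).length (pvSplit xs), h]
    cases hd : List.drop (pvSplit ys).length (pvSplit xs) with
    | nil => exact Or.inl (pvSplit_inj (by rw [hsplit, hd, List.append_nil]))
    | cons r rs =>
      right
      rw [hd] at hsplit
      have hxs : xs = ys ++ '.' :: pvJoin (r :: rs) := by
        rw [← pvJoin_pvSplit xs, hsplit, pvJoin_append _ _ (pvSplit_ne_nil ys) (by simp),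
          pvJoin_pvSplit]
      rw [hxs]
      exact ⟨pvJoin (r :: rs), by simp⟩
  · rintro (rfl | ⟨zs, rfl⟩)
    · simp
    · rw [List.append_assoc, List.singleton_append, pvSplit_append, List.take_left]

theorem map_ofList_inj {a b : List (List Char)}
    (h : a.map String.ofList = b.map String.ofList) : a = b := by
  have := congrArg (List.map String.toList) h
  simpa [List.map_map, Function.comp_def, String.toList_ofList] using this

-- ===== VERDICT (by name: the statement is the Claim_ definition above) =====
theorem check_authority_spec : Claim_equal_check_authority := by
  intro hrn hrn_auth _
  unfold Spec_check_authority check_authority check_authority_alt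
  rw [check_authority_loop_eq, geni_to_arr_eq, geni_to_arr_eq]
  simp only [List.drop_zero, Nat.sub_zero, List.length_map, ← List.map_take]
  apply Bool.eq_iff_iff.mpr
  rw [beq_iff_eq, Bool.or_eq_true, beq_iff_eq, PySem.Chars.startswith_iff]
  constructor
  · intro h
    exact (take_pvSplit_iff hrn.toList hrn_auth.toList).mp (map_ofList_inj h) |>.imp
      (fun he => by
        have := congrArg String.ofList he
        simpa [String.ofList_toList] using this) id
  · intro h
    rw [(take_pvSplit_iff hrn.toList hrn_auth.toList).mpr (h.imp (fun he => by rw [he]) id)]
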